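-- pv_equiv track=rewrite | github.com/msd7at/PepCoding | DSA LEVEL 1/Recursion with arraylists/get subsequence.py | prn
-- ===== SOURCE A (Python) =====
-- def prn(s):
--     if s=="":
--         return [""]
--     f=s[0]
--     res=s[1:]
--     ans=prn(res)
--
--     for i in res:
--         ans.append(""+i)
--         ans.append(f+i)
--     return ans
-- ===== SOURCE B (Python) =====
-- def prn(s):
--     # Iterative, single backward pass over s maintaining the current suffix,
--     # instead of A's recursion + per-level slicing.
--     out = [""]
--     rest = ""
--     for f in reversed(s):
--         for i in rest:
--             out.append(i)
--             out.append(f + i)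
--         rest = f + rest
--     return out
-- ===== Notes on version B (the rewrite author's own statement) =====
-- stated objective: alternative
-- what changed: Replaced the recursion (with a fresh slice at every level) by a single iterative backward pass that maintains the current suffix and extends one accumulator list.
import Mathlib
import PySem

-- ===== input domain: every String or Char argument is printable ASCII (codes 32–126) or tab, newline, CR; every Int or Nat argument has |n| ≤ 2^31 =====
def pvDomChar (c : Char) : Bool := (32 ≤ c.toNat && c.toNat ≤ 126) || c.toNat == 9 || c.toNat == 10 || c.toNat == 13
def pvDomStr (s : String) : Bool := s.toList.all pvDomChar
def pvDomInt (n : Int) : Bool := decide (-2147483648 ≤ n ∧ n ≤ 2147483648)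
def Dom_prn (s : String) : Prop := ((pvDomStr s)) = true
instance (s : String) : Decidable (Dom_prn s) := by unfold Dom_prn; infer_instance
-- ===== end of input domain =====

-- B replaces A's recursion (a fresh slice per level) by one iterative backward pass
-- that maintains the current suffix; same output values and order ('alternative').

-- ===== PORT A =====
-- A recurses on the string: s == "" → [""]; else f = s[0], res = s[1:], ans = prn(res),
-- then for i in res: ans.append("" + i); ans.append(f + i).  Ported on List Char
-- (s[0] / s[1:] are the head / tail of the character list; "" + i is the one-char
-- string of i, f + i the two-char string; the loop appending two strings per
-- character of res is ported as one flatMap of the two-element list, which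
-- produces the appended strings in the same order).
def prnL : List Char → List String
  | [] => [""]
  | f :: res =>
      prnL res ++ res.flatMap (fun i => [String.ofList [i], String.ofList [f, i]])

def prn (s : String) : List String := prnL s.toList

-- ===== PORT B =====
-- Source B: out = [""]; rest = ""; for f in reversed(s): for i in rest: out.append(i);
-- out.append(f + i); rest = f + rest; return out.  The loop state (out, rest) is a
-- pair; rest is kept as List Char (Python's string rest, 'f + rest' prepends f);
-- the inner loop's two appends per character are ported as one flatMap, in order.
def prnStep (st : List String × List Char) (f : Char) : List String × List Char :=
  (st.1 ++ st.2.flatMap (fun i => [String.ofList [i], String.ofList [f, i]]), f :: st.2)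

def prn_alt (s : String) : List String :=
  (s.toList.reverse.foldl prnStep ([""], [])).1

-- ===== PRECONDITION & SPEC =====
def Spec_prn (s : String) (out : List String) : Prop := out = prn_alt s
instance (s : String) (out : List String) : Decidable (Spec_prn s out) := by unfold Spec_prn; infer_instance

-- ===== CLAIM (what is proved, stated in full; the proofs are below) =====
def Claim_equal_prn : Prop := ∀ (s : String), Dom_prn s → Spec_prn s (prn s)

-- ===== LEMMAS AND PROOFS =====

-- Loop invariant of B: after consuming l.reverse, out is exactly prnL l and rest is l.
theorem prn_loop_spec (l : List Char) :
    l.reverse.foldl prnStep ([""], ([] : List Char)) = (prnL l, l) := by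
  induction l with
  | nil => rfl
  | cons f t ih =>
      simp only [List.reverse_cons, List.foldl_append, ih, List.foldl_cons,
        List.foldl_nil, prnStep, prnL]

-- ===== VERDICT (by name: the statement is the Claim_ definition above) =====
theorem prn_spec : Claim_equal_prn := by
  intro s _
  show prn s = prn_alt s
  unfold prn prn_alt
  rw [prn_loop_spec]
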